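-- pv_equiv track=rewrite | github.com/baeksangha/python_sw | 5203_베이비진게임/source.py | is_run
-- ===== SOURCE A (Python) =====
-- def is_run(arr):
--     arr = list(set(arr))
--     arr.sort()
--     if len(arr) < 3:
--         return 0
--     cnt = 1
--     for i in range(1, len(arr)):
--         if arr[i] == arr[i-1] + 1:
--             cnt += 1
--             if cnt == 3:
--                 return 1
--         else:
--             cnt = 1
--     return 0
-- ===== SOURCE B (Python) =====
-- def is_run(arr):
--     s = set(arr)
--     for x in s:
--         if x + 1 in s and x + 2 in s:
--             return 1
--     return 0
-- ===== Notes on version B (the rewrite author's own statement) =====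
-- stated objective: simpler
-- what changed: Replaces dedup+sort+sequential run-counter scan with a single pass over set(arr) testing x+1 and x+2 membership.
import Mathlib
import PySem

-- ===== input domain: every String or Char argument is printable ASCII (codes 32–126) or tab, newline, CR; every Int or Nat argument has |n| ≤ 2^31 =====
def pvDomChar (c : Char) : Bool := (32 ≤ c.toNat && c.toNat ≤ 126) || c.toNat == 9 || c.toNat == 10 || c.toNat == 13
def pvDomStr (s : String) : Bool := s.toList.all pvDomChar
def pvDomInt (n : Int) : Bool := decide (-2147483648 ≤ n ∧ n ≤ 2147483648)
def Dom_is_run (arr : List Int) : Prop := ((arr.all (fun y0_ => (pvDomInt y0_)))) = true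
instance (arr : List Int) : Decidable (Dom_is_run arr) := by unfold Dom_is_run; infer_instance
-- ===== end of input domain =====

-- B replaces A's dedup+sort+run-counter scan with membership tests x+1,x+2 over set(arr): simpler.

-- ===== PORT A =====
-- the for-loop over range(1, len(arr)) with running prev = arr[i-1] and counter cnt, with early return 1
def isRunLoopA (prev : Int) (cnt : Int) : List Int → Int
  | [] => 0
  | x :: xs =>
    if x = prev + 1 then
      if cnt + 1 = 3 then 1 else isRunLoopA x (cnt + 1) xs
    else isRunLoopA x 1 xs

def is_run (arr : List Int) : Int :=
  -- arr = list(set(arr)); arr.sort()  — sorted(set(arr)); the intermediate hash order is erased by the sort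
  let v := PySem.List.sorted (PySem.Set.ofList arr) (fun x => x) false
  if v.length < 3 then 0
  else match v with
    | [] => 0
    | x :: xs => isRunLoopA x 1 xs

-- ===== PORT B =====
def is_run_alt (arr : List Int) : Int :=
  let s := PySem.Set.ofList arr
  -- for x in s: early return 1 on hit — order-independent (any)
  if s.any (fun x => PySem.Set.contains s (x + 1) && PySem.Set.contains s (x + 2)) then 1 else 0

-- ===== PRECONDITION & SPEC =====
def Spec_is_run (arr : List Int) (out : Int) : Prop := out = is_run_alt arr
instance (arr : List Int) (out : Int) : Decidable (Spec_is_run arr out) := by unfold Spec_is_run; infer_instance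

-- ===== CLAIM (what is proved, stated in full; the proofs are below) =====
def Claim_equal_is_run : Prop := ∀ (arr : List Int), Dom_is_run arr → Spec_is_run arr (is_run arr)

-- ===== LEMMAS AND PROOFS =====

-- three adjacent consecutive values somewhere in the list
def chain3 : List Int → Bool
  | a :: b :: c :: r => (decide (b = a + 1) && decide (c = b + 1)) || chain3 (b :: c :: r)
  | _ => false

lemma chain3_of_tail {a : Int} {l : List Int} (h : chain3 l = true) : chain3 (a :: l) = true := by
  match l with
  | [] => simp [chain3] at h
  | [b] => simp [chain3] at h
  | b :: c :: r => simp [chain3, h]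

-- joint characterisation of the run-counter loop by chain3
lemma isRunLoopA_chain3 (l : List Int) :
    (∀ a : Int, isRunLoopA a 1 l = (if chain3 (a :: l) then 1 else 0)) ∧
    (∀ a : Int, isRunLoopA a 2 l =
      (if l.head? = some (a + 1) then 1 else if chain3 (a :: l) then 1 else 0)) := by
  induction l with
  | nil =>
    constructor
    · intro a; simp [isRunLoopA, chain3]
    · intro a; simp [isRunLoopA, chain3]
  | cons x xs ih =>
    have s1 := ih.1
    have s2 := ih.2
    constructor
    · intro a
      by_cases hx : x = a + 1
      · have e : isRunLoopA a 1 (x :: xs) = isRunLoopA x 2 xs := by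
          simp [isRunLoopA, hx]
        rw [e, s2 x]
        cases xs with
        | nil => simp [chain3]
        | cons c r =>
          by_cases hc : c = x + 1
          · simp [chain3, hx, hc]
          · have hco : ¬ (List.head? (c :: r) = some (x + 1)) := by simp [hc]
            rw [if_neg hco]
            have hc2 : ¬ (c = a + 1 + 1) := by omega
            simp [chain3, hx, hc2]
      · have e : isRunLoopA a 1 (x :: xs) = isRunLoopA x 1 xs := by
          simp [isRunLoopA, hx]
        rw [e, s1 x]
        cases xs with
        | nil => simp [chain3]
        | cons c r => simp [chain3, hx]
    · intro a
      by_cases hx : x = a + 1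
      · simp [isRunLoopA, hx]
      · have e : isRunLoopA a 2 (x :: xs) = isRunLoopA x 1 xs := by
          simp [isRunLoopA, hx]
        have hco : ¬ (List.head? (x :: xs) = some (a + 1)) := by simp [hx]
        rw [e, s1 x, if_neg hco]
        cases xs with
        | nil => simp [chain3]
        | cons c r => simp [chain3, hx]

-- chain3 → three members
lemma chain3_exists {l : List Int} (h : chain3 l = true) :
    ∃ x, x ∈ l ∧ x + 1 ∈ l ∧ x + 2 ∈ l := by
  induction l with
  | nil => simp [chain3] at h
  | cons a t ih =>
    match t, ih with
    | [], _ => simp [chain3] at h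
    | [b], _ => simp [chain3] at h
    | b :: c :: s, ih =>
      simp only [chain3, Bool.or_eq_true, Bool.and_eq_true, decide_eq_true_eq] at h
      rcases h with ⟨hb, hc⟩ | h
      · refine ⟨a, by simp, by simp [hb], ?_⟩
        have : c = a + 2 := by omega
        simp [this]
      · rcases ih h with ⟨x, h1, h2, h3⟩
        exact ⟨x, by simp [h1], by simp [h2], by simp [h3]⟩

-- in a strictly increasing list, members x, x+1, x+2 must be adjacent
lemma chain3_of_mem {l : List Int} (hs : l.Pairwise (· < ·)) {x : Int}
    (h1 : x ∈ l) (h2 : x + 1 ∈ l) (h3 : x + 2 ∈ l) : chain3 l = true := by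
  induction l with
  | nil => simp at h1
  | cons a t ih =>
    have hlt : ∀ y ∈ t, a < y := (List.pairwise_cons.mp hs).1
    have hst : t.Pairwise (· < ·) := (List.pairwise_cons.mp hs).2
    by_cases hxa : x = a
    · subst hxa
      have h2t : x + 1 ∈ t := by
        rcases List.mem_cons.mp h2 with h | h
        · omega
        · exact h
      have h3t : x + 2 ∈ t := by
        rcases List.mem_cons.mp h3 with h | h
        · omega
        · exact h
      match t, hlt, hst, h2t, h3t with
      | b :: u, hlt, hst, h2t, h3t =>
        have hbmin : ∀ y ∈ u, b < y := (List.pairwise_cons.mp hst).1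
        have hb : b = x + 1 := by
          rcases List.mem_cons.mp h2t with h | h
          · omega
          · have := hbmin _ h
            have := hlt b (by simp)
            omega
        match u, hbmin, h3t with
        | c :: w, hbmin, h3t =>
          have hcmin : ∀ y ∈ w, c < y :=
            (List.pairwise_cons.mp (List.pairwise_cons.mp hst).2).1
          have hc : c = x + 2 := by
            rcases List.mem_cons.mp h3t with h | h
            · omega
            · rcases List.mem_cons.mp h with h | h
              · omega
              · have := hcmin _ h
                have := hbmin c (by simp)
                omega
          subst hb; subst hc
          simp [chain3]
          exact Or.inl (by omega)
        | [], _, h3t =>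
          rcases List.mem_cons.mp h3t with h | h
          · omega
          · simp at h
    · have h1t : x ∈ t := by
        rcases List.mem_cons.mp h1 with h | h
        · omega
        · exact h
      have hax : a < x := hlt x h1t
      have h2t : x + 1 ∈ t := by
        rcases List.mem_cons.mp h2 with h | h
        · omega
        · exact h
      have h3t : x + 2 ∈ t := by
        rcases List.mem_cons.mp h3 with h | h
        · omega
        · exact h
      exact chain3_of_tail (ih hst h1t h2t h3t)

lemma chain3_short {l : List Int} (h : l.length < 3) : chain3 l = false := by
  match l with
  | [] => rfl
  | [a] => rfl
  | [a, b] => rfl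
  | a :: b :: c :: r => simp at h; omega

lemma is_run_eq_chain3 (arr : List Int) :
    is_run arr = (if chain3 (PySem.List.sorted (PySem.Set.ofList arr) (fun x => x) false) then 1 else 0) := by
  unfold is_run
  by_cases h : (PySem.List.sorted (PySem.Set.ofList arr) (fun x => x) false).length < 3
  · rw [if_pos h, chain3_short h]
    simp
  · simp only [h, if_false]
    cases hv : PySem.List.sorted (PySem.Set.ofList arr) (fun x => x) false with
    | nil => simp [chain3]
    | cons a t => exact (isRunLoopA_chain3 t).1 a

-- ===== VERDICT (by name: the statement is the Claim_ definition above) =====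
theorem is_run_spec : Claim_equal_is_run := by
  intro arr _
  unfold Spec_is_run
  rw [is_run_eq_chain3]
  unfold is_run_alt
  have hmemv : ∀ y : Int,
      y ∈ PySem.List.sorted (PySem.Set.ofList arr) (fun x => x) false ↔ y ∈ PySem.Set.ofList arr :=
    fun y => PySem.List.mem_sorted _ _ _ y
  have hsorted : (PySem.List.sorted (PySem.Set.ofList arr) (fun x => x) false).Pairwise (· < ·) :=
    PySem.List.sorted_ofList_pairwise_lt arr
  by_cases hc : chain3 (PySem.List.sorted (PySem.Set.ofList arr) (fun x => x) false) = true
  · rcases chain3_exists hc with ⟨x, h1, h2, h3⟩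
    have hany : (PySem.Set.ofList arr).any
        (fun x => PySem.Set.contains (PySem.Set.ofList arr) (x + 1) &&
                  PySem.Set.contains (PySem.Set.ofList arr) (x + 2)) = true := by
      refine List.any_eq_true.mpr ⟨x, (hmemv x).mp h1, ?_⟩
      rw [Bool.and_eq_true,
        PySem.Set.contains_iff (PySem.Set.ofList arr) (x + 1),
        PySem.Set.contains_iff (PySem.Set.ofList arr) (x + 2)]
      exact ⟨(hmemv _).mp h2, (hmemv _).mp h3⟩
    rw [if_pos hc]
    simp only [hany]
    rfl
  · rw [if_neg hc]
    cases hany : (PySem.Set.ofList arr).any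
        (fun x => PySem.Set.contains (PySem.Set.ofList arr) (x + 1) &&
                  PySem.Set.contains (PySem.Set.ofList arr) (x + 2)) with
    | false =>
      simp only [hany]
      rfl
    | true =>
      exfalso
      rcases List.any_eq_true.mp hany with ⟨x, hx, hb⟩
      rw [Bool.and_eq_true, PySem.Set.contains_iff, PySem.Set.contains_iff] at hb
      exact hc (chain3_of_mem hsorted ((hmemv x).mpr hx) ((hmemv _).mpr hb.1) ((hmemv _).mpr hb.2))
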